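-- pv_equiv track=rewrite | github.com/yuekriswu/context-dependent-processing | optimization_code/spatialrnn/src/niarb/utils.py | nonoverlapping_partition
-- ===== SOURCE A (Python) =====
-- from collections.abc import (
--     Sequence,
--     Mapping,
--     Iterable,
--     Callable,
--     Collection,
--     Mapping,
--     Hashable,
-- )
-- from itertools import starmap, pairwise, chain
-- import operator
--
-- def nonoverlapping_partition(
--     centers: Sequence[int | float], window: int | float
-- ) -> list[list[int | float]]:
--     """Compute a partition of centers into subsequences without overlaps.
--
--     Args:
--         centers: The centers of the windows, assumed to be sorted.
--         window: The width of the windows.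
--
--     Returns:
--         A partition of centers into subsequences without overlaps.
--
--     Examples:
--         >>> nonoverlapping_partition([1, 3, 5], 2)
--         [[1, 3, 5]]
--
--         >>> nonoverlapping_partition([1, 3, 5], 3)
--         [[1, 5], [3]]
--
--         >>> nonoverlapping_partition([1, 2, 3, 4, 5], 3)
--         [[1, 4], [2, 5], [3]]
--
--     """
--     if len(centers) == 0:
--         return []
--
--     if any(starmap(operator.gt, pairwise(centers))):
--         raise ValueError("centers must be sorted.")
--
--     partition = [[centers[0]]]
--     for center in centers[1:]:
--         for p in partition:
--             if center - p[-1] >= window: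
--                 p.append(center)
--                 break
--         else:
--             partition.append([center])
--
--     return partition
-- ===== SOURCE B (Python) =====
-- def nonoverlapping_partition(centers, window):
--     """Same greedy first-fit partition, but the leftmost eligible subsequence is
--     found with a persistent min segment tree (leftmost leaf with value <= c-window)
--     instead of scanning all subsequences."""
--     if len(centers) == 0:
--         return []
--
--     if any(b < a for a, b in zip(centers, centers[1:])):
--         raise ValueError("centers must be sorted.")
--
--     n = len(centers)
--     h = (n - 1).bit_length()
--
--     def build(h):
--         return None if h == 0 else (None, build(h - 1), build(h - 1))
--
--     def tmin(tr, h):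
--         return tr if h == 0 else tr[0]
--
--     def ok(v, t):
--         return v is not None and v <= t
--
--     def minopt(a, b):
--         if a is None:
--             return b
--         if b is None:
--             return a
--         return a if a <= b else b
--
--     def query(tr, h, lo, t):
--         # leftmost leaf index (absolute, leftmost leaf of tr is lo) with value <= t, else -1
--         if not ok(tmin(tr, h), t):
--             return -1
--         if h == 0:
--             return lo
--         _, l, r = tr
--         res = query(l, h - 1, lo, t)
--         return res if res != -1 else query(r, h - 1, lo + (1 << (h - 1)), t)
--
--     def update(tr, h, i, c):
--         if h == 0:
--             return c
--         _, l, r = tr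
--         half = 1 << (h - 1)
--         if i < half:
--             l = update(l, h - 1, i, c)
--         else:
--             r = update(r, h - 1, i - half, c)
--         return (minopt(tmin(l, h - 1), tmin(r, h - 1)), l, r)
--
--     tree = build(h)
--     parts = []
--     for c in centers:
--         i = query(tree, h, 0, c - window)
--         if i == -1:
--             parts.append([c])
--             tree = update(tree, h, len(parts) - 1, c)
--         else:
--             parts[i].append(c)
--             tree = update(tree, h, i, c)
--     return parts
-- ===== Notes on version B (the rewrite author's own statement) =====
-- stated objective: faster
-- what changed: A scans all existing subsequences for each center (first-fit by linear scan); B keeps the last value of every subsequence in a persistent min segment tree and finds the leftmost eligible subsequence (last <= center - window) by tree descent, with a point update per center.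
import Mathlib
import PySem

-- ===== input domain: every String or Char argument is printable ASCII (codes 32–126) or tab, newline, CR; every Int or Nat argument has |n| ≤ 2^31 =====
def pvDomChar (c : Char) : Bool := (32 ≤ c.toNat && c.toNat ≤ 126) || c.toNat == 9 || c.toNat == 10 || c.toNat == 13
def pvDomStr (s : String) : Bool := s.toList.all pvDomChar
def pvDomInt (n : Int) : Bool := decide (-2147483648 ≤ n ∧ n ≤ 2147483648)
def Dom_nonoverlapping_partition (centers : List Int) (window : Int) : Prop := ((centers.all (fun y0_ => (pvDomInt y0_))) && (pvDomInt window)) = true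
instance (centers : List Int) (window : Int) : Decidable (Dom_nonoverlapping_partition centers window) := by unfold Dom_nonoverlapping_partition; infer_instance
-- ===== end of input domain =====

-- B replaces A's linear scan over existing subsequences by a persistent min segment tree
-- (leftmost leaf with last-value ≤ c - window), an alternative O(n log n) algorithm.


-- ===== PORT A =====
-- p[-1]: the partition lists are nonempty by construction, so the default 0 is never used
def lastOf (p : List Int) : Int := p.getLastD 0

-- any(starmap(operator.gt, pairwise(centers)))
def hasDescentA : List Int → Bool
  | a :: b :: rest => (decide (a > b)) || hasDescentA (b :: rest)
  | _ => false

-- the inner 'for p in partition: … break / else: partition.append([center])' loop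
def stepA (window c : Int) : List (List Int) → List (List Int)
  | [] => [[c]]
  | p :: ps => if c - lastOf p ≥ window then (p ++ [c]) :: ps else p :: stepA window c ps

def nonoverlapping_partition (centers : List Int) (window : Int) : List (List Int) :=
  match centers with
  | [] => []
  | c0 :: rest =>
    if hasDescentA centers then []  -- Python raises ValueError here; excluded by Pre_
    else rest.foldl (fun part c => stepA window c part) [[c0]]

-- ===== PORT B =====
-- Python B's tuple tree (None,l,r) / leaf value; the leaf-vs-node distinction Python takes
-- from h is carried by the constructors, so tmin needs no h argument
inductive PTree where
  | leaf : Option Int → PTree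
  | node : Option Int → PTree → PTree → PTree
deriving Repr

def tmin : PTree → Option Int
  | .leaf v => v
  | .node m _ _ => m

def buildT : Nat → PTree
  | 0 => .leaf none
  | h + 1 => .node none (buildT h) (buildT h)

-- ok(v, t): v is not None and v <= t
def okv (v : Option Int) (t : Int) : Bool :=
  match v with
  | none => false
  | some x => decide (x ≤ t)

def minOpt (a b : Option Int) : Option Int :=
  match a, b with
  | none, b => b
  | a, none => a
  | some x, some y => if x ≤ y then some x else some y

-- leftmost leaf index (absolute; leftmost leaf of tr is lo) with value ≤ t, else -1
def tquery : PTree → Nat → Nat → Int → Int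
  | .leaf v, _, lo, t => if okv v t then (lo : Int) else -1
  | .node m l r, h, lo, t =>
    if okv m t then
      let res := tquery l (h - 1) lo t
      if res ≠ -1 then res else tquery r (h - 1) (lo + 2 ^ (h - 1)) t
    else -1

def tupdate : PTree → Nat → Nat → Int → PTree
  | .leaf _, _, _, c => .leaf (some c)
  | .node _ l r, h, i, c =>
    let half := 2 ^ (h - 1)
    if i < half then
      let l' := tupdate l (h - 1) i c
      .node (minOpt (tmin l') (tmin r)) l' r
    else
      let r' := tupdate r (h - 1) (i - half) c
      .node (minOpt (tmin l) (tmin r')) l r'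

-- any(b < a for a, b in zip(centers, centers[1:]))
def hasDescentB : List Int → Bool
  | a :: b :: rest => (decide (b < a)) || hasDescentB (b :: rest)
  | _ => false

-- the body of B's 'for c in centers' loop; i is ≥ 0 whenever it is not -1, so .toNat is exact
def stepB (window : Int) (h : Nat) (st : List (List Int) × PTree) (c : Int) : List (List Int) × PTree :=
  let i := tquery st.2 h 0 (c - window)
  if i = -1 then
    let parts := st.1 ++ [[c]]
    (parts, tupdate st.2 h (parts.length - 1) c)
  else
    (st.1.modify i.toNat (· ++ [c]), tupdate st.2 h i.toNat c)

def nonoverlapping_partition_alt (centers : List Int) (window : Int) : List (List Int) :=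
  match centers with
  | [] => []
  | _ :: _ =>
    if hasDescentB centers then []  -- Python raises ValueError here; excluded by Pre_
    else
      let h := Nat.size (centers.length - 1)   -- (n - 1).bit_length()
      (centers.foldl (stepB window h) ([], buildT h)).1

-- ===== PRECONDITION & SPEC =====
-- Pre_ excludes exactly the unsorted center lists, on which Python A (and Python B) raise ValueError.
def Pre_nonoverlapping_partition (centers : List Int) (window : Int) : Prop :=
  List.Pairwise (· ≤ ·) centers
instance (centers : List Int) (window : Int) : Decidable (Pre_nonoverlapping_partition centers window) := by unfold Pre_nonoverlapping_partition; infer_instance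

def pvWitness_nonoverlapping_partition : List Int × Int := ([1, 2, 3, 4, 5], 3)

def Spec_nonoverlapping_partition (centers : List Int) (window : Int) (out : List (List Int)) : Prop := out = nonoverlapping_partition_alt centers window
instance (centers : List Int) (window : Int) (out : List (List Int)) : Decidable (Spec_nonoverlapping_partition centers window out) := by unfold Spec_nonoverlapping_partition; infer_instance

-- ===== CLAIM (what is proved, stated in full; the proofs are below) =====
def Claim_equal_nonoverlapping_partition : Prop := ∀ (centers : List Int) (window : Int), Dom_nonoverlapping_partition centers window → Pre_nonoverlapping_partition centers window → Spec_nonoverlapping_partition centers window (nonoverlapping_partition centers window)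

-- ===== LEMMAS AND PROOFS =====

-- the tree tr of height h represents the leaf values f 0, …, f (2^h - 1), with correct cached minima
def Good : PTree → Nat → (Nat → Option Int) → Prop
  | .leaf v, h, f => h = 0 ∧ v = f 0
  | .node m l r, h, f => 0 < h ∧ Good l (h - 1) f ∧ Good r (h - 1) (fun j => f (j + 2 ^ (h - 1))) ∧ m = minOpt (tmin l) (tmin r)

theorem tmin_build (h : Nat) : tmin (buildT h) = none := by
  cases h <;> rfl

theorem good_build (h : Nat) : Good (buildT h) h (fun _ => none) := by
  induction h with
  | zero => exact ⟨rfl, rfl⟩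
  | succ h ih =>
    refine ⟨Nat.succ_pos h, ?_, ?_, ?_⟩
    · simpa using ih
    · simpa using ih
    · simp [tmin_build, minOpt]

theorem good_congr {tr : PTree} {h : Nat} {f g : Nat → Option Int}
    (hg : Good tr h f) (hfg : ∀ i < 2 ^ h, f i = g i) : Good tr h g := by
  induction tr generalizing h f g with
  | leaf v => exact ⟨hg.1, hg.2.trans (hfg 0 (by rw [hg.1]; omega))⟩
  | node m l r ihl ihr =>
    obtain ⟨hpos, hl, hr, hm⟩ := hg
    have h2 : 2 ^ h = 2 ^ (h - 1) + 2 ^ (h - 1) := by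
      have : h - 1 + 1 = h := Nat.succ_pred_eq_of_pos hpos
      calc 2 ^ h = 2 ^ (h - 1 + 1) := by rw [this]
        _ = 2 ^ (h - 1) + 2 ^ (h - 1) := by rw [pow_succ]; omega
    refine ⟨hpos, ihl hl (fun i hi => hfg i (by omega)), ihr hr (fun j hj => hfg (j + 2 ^ (h - 1)) (by omega)), hm⟩

theorem okv_minOpt (a b : Option Int) (t : Int) :
    okv (minOpt a b) t = (okv a t || okv b t) := by
  rcases a with _ | x <;> rcases b with _ | y
  · rfl
  · simp [minOpt, okv]
  · simp [minOpt, okv]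
  · simp only [minOpt]
    split_ifs with hxy <;> simp only [okv] <;>
      rw [Bool.eq_iff_iff] <;> simp only [Bool.or_eq_true, decide_eq_true_eq] <;> omega

theorem good_min {tr : PTree} {h : Nat} {f : Nat → Option Int}
    (hg : Good tr h f) (t : Int) :
    okv (tmin tr) t = true ↔ ∃ i < 2 ^ h, okv (f i) t = true := by
  induction tr generalizing h f with
  | leaf v =>
    obtain ⟨h0, hv⟩ := hg
    subst h0
    simp only [tmin, hv, pow_zero]
    constructor
    · intro hok; exact ⟨0, by omega, hok⟩
    · rintro ⟨i, hi, hok⟩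
      have h0 : i = 0 := by omega
      rwa [h0] at hok
  | node m l r ihl ihr =>
    obtain ⟨hpos, hl, hr, hm⟩ := hg
    have h2 : 2 ^ h = 2 ^ (h - 1) + 2 ^ (h - 1) := by
      have : h - 1 + 1 = h := Nat.succ_pred_eq_of_pos hpos
      calc 2 ^ h = 2 ^ (h - 1 + 1) := by rw [this]
        _ = 2 ^ (h - 1) + 2 ^ (h - 1) := by rw [pow_succ]; omega
    rw [tmin, hm, okv_minOpt, Bool.or_eq_true, ihl hl, ihr hr]
    constructor
    · rintro (⟨i, hi, hok⟩ | ⟨j, hj, hok⟩)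
      · exact ⟨i, by omega, hok⟩
      · exact ⟨j + 2 ^ (h - 1), by omega, hok⟩
    · rintro ⟨i, hi, hok⟩
      by_cases hlt : i < 2 ^ (h - 1)
      · exact Or.inl ⟨i, hlt, hok⟩
      · refine Or.inr ⟨i - 2 ^ (h - 1), by omega, ?_⟩
        have : i - 2 ^ (h - 1) + 2 ^ (h - 1) = i := by omega
        rw [this]; exact hok

theorem good_query {tr : PTree} {h : Nat} {f : Nat → Option Int}
    (hg : Good tr h f) (lo : Nat) (t : Int) :
    tquery tr h lo t =
      match (List.range (2 ^ h)).find? (fun i => okv (f i) t) with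
      | some i => ((lo + i : Nat) : Int)
      | none => -1 := by
  induction tr generalizing h f lo with
  | leaf v =>
    obtain ⟨h0, hv⟩ := hg
    subst h0
    simp only [tquery, hv, pow_zero, List.range_one, List.find?_cons, List.find?_nil]
    by_cases hok : okv (f 0) t = true
    · simp [hok]
    · simp [hok]
  | node m l r ihl ihr =>
    obtain ⟨hpos, hl, hr, hm⟩ := hg
    have h2 : 2 ^ h = 2 ^ (h - 1) + 2 ^ (h - 1) := by
      have : h - 1 + 1 = h := Nat.succ_pred_eq_of_pos hpos
      calc 2 ^ h = 2 ^ (h - 1 + 1) := by rw [this]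
        _ = 2 ^ (h - 1) + 2 ^ (h - 1) := by rw [pow_succ]; omega
    by_cases hok : okv m t = true
    · have hsplit : List.range (2 ^ h) =
          List.range (2 ^ (h - 1)) ++ (List.range (2 ^ (h - 1))).map (fun x => 2 ^ (h - 1) + x) := by
        rw [h2, List.range_add]
      have hmapped : (fun i => okv (f i) t) ∘ (fun x => 2 ^ (h - 1) + x)
          = fun j => okv ((fun j => f (j + 2 ^ (h - 1))) j) t := by
        funext j; simp [Function.comp, Nat.add_comm]
      rw [tquery]
      simp only [hok, if_true]
      rw [hsplit, List.find?_append, List.find?_map, hmapped]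
      rcases hfl : (List.range (2 ^ (h - 1))).find? (fun i => okv (f i) t) with _ | i
      · -- left subtree: nothing found
        have hresL : tquery l (h - 1) lo t = -1 := by rw [ihl hl]; rw [hfl]
        simp only [hresL, ne_eq, not_true_eq_false, if_false, Option.or]
        rw [ihr hr]
        rcases hfr : (List.range (2 ^ (h - 1))).find? (fun j => okv (f (j + 2 ^ (h - 1))) t) with _ | j
        · simp
        · simp only [Option.map_some]
          have : lo + 2 ^ (h - 1) + j = lo + (2 ^ (h - 1) + j) := by omega
          rw [this]
      · -- found in left subtree
        have hresL : tquery l (h - 1) lo t = ((lo + i : Nat) : Int) := by rw [ihl hl]; rw [hfl]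
        have hne : ((lo + i : Nat) : Int) ≠ -1 := by
          have := Int.natCast_nonneg (lo + i); omega
        simp only [hresL, ne_eq]
        rw [if_pos hne]
        simp [Option.or]
    · -- pruned: the cached min says no leaf qualifies
      have hnone : (List.range (2 ^ h)).find? (fun i => okv (f i) t) = none := by
        rw [List.find?_eq_none]
        intro x hx
        intro hpx
        exact hok ((good_min (show Good (.node m l r) h f from ⟨hpos, hl, hr, hm⟩) t).2
          ⟨x, List.mem_range.mp hx, hpx⟩)
      have hok' : okv m t = false := by rwa [Bool.not_eq_true] at hok
      rw [tquery, hok', hnone]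
      simp

theorem good_update {tr : PTree} {h : Nat} {f : Nat → Option Int}
    (hg : Good tr h f) (i : Nat) (c : Int) (hi : i < 2 ^ h) :
    Good (tupdate tr h i c) h (Function.update f i (some c)) := by
  induction tr generalizing h f i with
  | leaf v =>
    obtain ⟨h0, hv⟩ := hg
    subst h0
    have h0 : i = 0 := by simpa using hi
    subst h0
    show (0 : Nat) = 0 ∧ some c = Function.update f 0 (some c) 0
    exact ⟨rfl, by simp⟩
  | node m l r ihl ihr =>
    obtain ⟨hpos, hl, hr, hm⟩ := hg
    have h2 : 2 ^ h = 2 ^ (h - 1) + 2 ^ (h - 1) := by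
      have : h - 1 + 1 = h := Nat.succ_pred_eq_of_pos hpos
      calc 2 ^ h = 2 ^ (h - 1 + 1) := by rw [this]
        _ = 2 ^ (h - 1) + 2 ^ (h - 1) := by rw [pow_succ]; omega
    rw [tupdate]
    by_cases hlt : i < 2 ^ (h - 1)
    · simp only [hlt, if_true]
      refine ⟨hpos, ihl hl i hlt, ?_, rfl⟩
      refine good_congr hr (fun j hj => ?_)
      rw [Function.update_apply]
      have : ¬ (j + 2 ^ (h - 1) = i) := by omega
      simp [this]
    · simp only [hlt, if_false]
      refine ⟨hpos, ?_, ?_, rfl⟩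
      · refine good_congr hl (fun j hj => ?_)
        rw [Function.update_apply]
        have : ¬ (j = i) := by omega
        simp [this]
      · have hi' : i - 2 ^ (h - 1) < 2 ^ (h - 1) := by omega
        refine good_congr (ihr hr (i - 2 ^ (h - 1)) hi') (fun j hj => ?_)
        rw [Function.update_apply, Function.update_apply]
        by_cases hji : j = i - 2 ^ (h - 1)
        · have hcanc : i - 2 ^ (h - 1) + 2 ^ (h - 1) = i := by omega
          simp [hji, hcanc]
        · have : ¬ (j + 2 ^ (h - 1) = i) := by omega
          simp [hji, this]

-- A's inner loop computes: append c to the leftmost partition whose last value is ≤ c - window,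
-- or start a new partition.  Stated with the same find?-over-range form the query lemma produces.
theorem stepA_char (w c : Int) (parts : List (List Int)) (n : Nat) (hn : parts.length ≤ n) :
    (match (List.range n).find? (fun i => okv ((parts[i]?).map lastOf) (c - w)) with
     | none => parts ++ [[c]]
     | some i => parts.modify i (· ++ [c])) = stepA w c parts := by
  induction parts generalizing n with
  | nil =>
    have : (List.range n).find? (fun i => okv ((([] : List (List Int))[i]?).map lastOf) (c - w)) = none := by
      rw [List.find?_eq_none]; intro x _; simp [okv]
    rw [this]; rfl
  | cons p ps ih =>
    obtain ⟨m, rfl⟩ : ∃ m, n = m + 1 := ⟨n - 1, by simp at hn; omega⟩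
    rw [List.range_succ_eq_map, List.find?]
    by_cases hok : okv (((p :: ps)[0]?).map lastOf) (c - w) = true
    · simp only [hok]
      have hcond : c - lastOf p ≥ w := by
        simp [okv] at hok; omega
      simp [stepA, hcond, List.modify]
    · have hok' : okv (((p :: ps)[0]?).map lastOf) (c - w) = false := Bool.eq_false_iff.mpr hok
      simp only [hok']
      have hcond : ¬ (c - lastOf p ≥ w) := by
        simp [okv] at hok'; omega
      rw [List.find?_map]
      have hpred : (fun i => okv (((p :: ps)[i]?).map lastOf) (c - w)) ∘ Nat.succ
          = fun i => okv ((ps[i]?).map lastOf) (c - w) := by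
        funext i; simp [Function.comp]
      rw [hpred]
      have hlen : ps.length ≤ m := by simp at hn; omega
      rcases hf : (List.range m).find? (fun i => okv ((ps[i]?).map lastOf) (c - w)) with _ | i
      · have := ih m hlen; rw [hf] at this
        simp only [Option.map_none]
        simp [stepA, hcond, ← this]
      · have := ih m hlen; rw [hf] at this
        simp only [Option.map_some]
        simp [stepA, hcond, ← this, List.modify]

theorem find_lt_length {parts : List (List Int)} {n : Nat} {t : Int} {i : Nat}
    (hf : (List.range n).find? (fun i => okv ((parts[i]?).map lastOf) t) = some i) :
    i < parts.length := by
  have hp := List.find?_some hf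
  by_contra hge
  rw [List.getElem?_eq_none (by omega)] at hp
  simp [okv] at hp

theorem loop_eq (w : Int) (h : Nat) (cs : List Int) :
    ∀ (parts : List (List Int)) (tree : PTree),
    Good tree h (fun i => (parts[i]?).map lastOf) →
    parts.length + cs.length ≤ 2 ^ h →
    (cs.foldl (stepB w h) (parts, tree)).1
      = cs.foldl (fun part c => stepA w c part) parts := by
  induction cs with
  | nil => intro parts tree _ _; rfl
  | cons c cs ih =>
    intro parts tree hg hlen
    have hq := good_query hg 0 (c - w)
    simp only [Nat.zero_add] at hq
    rw [List.foldl_cons, List.foldl_cons]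
    rcases hf : (List.range (2 ^ h)).find? (fun i => okv (((parts[i]?).map lastOf)) (c - w)) with _ | i
    · -- no eligible partition: a new one is created
      rw [hf] at hq
      have hstep : stepB w h (parts, tree) c
          = (parts ++ [[c]], tupdate tree h parts.length c) := by
        simp only [stepB, hq]
        simp
      rw [hstep]
      have hchar := stepA_char w c parts (2 ^ h) (by simp at hlen ⊢; omega)
      rw [hf] at hchar
      rw [← hchar]
      have hplt : parts.length < 2 ^ h := by simp at hlen; omega
      have hg' : Good (tupdate tree h parts.length c) h
          (fun i => (((parts ++ [[c]])[i]?).map lastOf)) := by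
        refine good_congr (good_update hg parts.length c hplt) (fun i _ => ?_)
        rw [Function.update_apply]
        by_cases hip : i = parts.length
        · subst hip
          rw [List.getElem?_append_right (le_refl _)]
          simp [lastOf]
        · by_cases hlt : i < parts.length
          · simp [hip, List.getElem?_append_left hlt]
          · have h1 : parts[i]? = none := List.getElem?_eq_none (by omega)
            have h2 : (parts ++ [[c]])[i]? = none := List.getElem?_eq_none (by simp; omega)
            simp [hip, h1, h2]
      exact ih (parts ++ [[c]]) _ hg' (by simp at hlen ⊢; omega)
    · -- eligible partition i found
      rw [hf] at hq
      have hilt : i < parts.length := find_lt_length hf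
      have hne : ((i : Nat) : Int) ≠ -1 := by
        have := Int.natCast_nonneg i; omega
      have hstep : stepB w h (parts, tree) c
          = (parts.modify i (· ++ [c]), tupdate tree h i c) := by
        simp only [stepB, hq]
        simp [hne]
      rw [hstep]
      have hchar := stepA_char w c parts (2 ^ h) (by simp at hlen ⊢; omega)
      rw [hf] at hchar
      rw [← hchar]
      have hg' : Good (tupdate tree h i c) h
          (fun j => (((parts.modify i (· ++ [c]))[j]?).map lastOf)) := by
        refine good_congr (good_update hg i c (by simp at hlen; omega)) (fun j _ => ?_)
        rw [Function.update_apply, List.getElem?_modify]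
        by_cases hji : j = i
        · subst hji
          rw [List.getElem?_eq_getElem hilt]
          simp [lastOf]
        · have : ¬ (i = j) := fun hh => hji hh.symm
          simp [hji, this]
      exact ih _ _ hg' (by simp at hlen ⊢; omega)

theorem chain'_descA {l : List Int} (h : List.Pairwise (· ≤ ·) l) : hasDescentA l = false := by
  induction l with
  | nil => rfl
  | cons a l ih =>
    cases l with
    | nil => rfl
    | cons b l =>
      rw [List.pairwise_cons] at h
      simp only [hasDescentA, Bool.or_eq_false_iff]
      refine ⟨by simp; exact h.1 b (by simp), ih h.2⟩

theorem chain'_descB {l : List Int} (h : List.Pairwise (· ≤ ·) l) : hasDescentB l = false := by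
  induction l with
  | nil => rfl
  | cons a l ih =>
    cases l with
    | nil => rfl
    | cons b l =>
      rw [List.pairwise_cons] at h
      simp only [hasDescentB, Bool.or_eq_false_iff]
      refine ⟨by simp; exact h.1 b (by simp), ih h.2⟩

-- ===== VERDICT (by name: the statement is the Claim_ definition above) =====
theorem nonoverlapping_partition_spec : Claim_equal_nonoverlapping_partition := by
  intro centers window _ hpre
  unfold Spec_nonoverlapping_partition
  cases centers with
  | nil => rfl
  | cons c0 rest =>
    unfold nonoverlapping_partition nonoverlapping_partition_alt
    rw [chain'_descA hpre, chain'_descB hpre]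
    simp only [Bool.false_eq_true, if_false]
    set h := Nat.size ((c0 :: rest).length - 1) with hh
    -- the first iteration of B's loop creates the partition [[c0]]
    have hq0 := good_query (good_build h) 0 (c0 - window)
    have hfnone : (List.range (2 ^ h)).find? (fun i => okv ((fun _ => (none : Option Int)) i) (c0 - window)) = none := by
      rw [List.find?_eq_none]; intro x _; simp [okv]
    rw [hfnone] at hq0
    have hstep0 : stepB window h (([] : List (List Int)), buildT h) c0
        = ([[c0]], tupdate (buildT h) h 0 c0) := by
      simp only [stepB, hq0]
      simp
    rw [List.foldl_cons, hstep0]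
    have hg1 : Good (tupdate (buildT h) h 0 c0) h
        (fun i => (([[c0]] : List (List Int))[i]?).map lastOf) := by
      refine good_congr (good_update (good_build h) 0 c0 (Nat.two_pow_pos h)) (fun i _ => ?_)
      rw [Function.update_apply]
      by_cases hi : i = 0
      · subst hi; simp [lastOf]
      · obtain ⟨j, rfl⟩ : ∃ j, i = j + 1 := ⟨i - 1, by omega⟩
        simp
    have hlen : (1 : Nat) + rest.length ≤ 2 ^ h := by
      have hsz := Nat.lt_size_self ((c0 :: rest).length - 1)
      simp only [List.length_cons] at hsz
      rw [hh]
      simp only [List.length_cons]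
      omega
    rw [loop_eq window h rest [[c0]] _ hg1 (by simpa using hlen)]
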